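-- pv_equiv track=rewrite | github.com/hlmu/NLP-lab2-opinon-mining | 属性词情感词抽取/ERNIE/ERNIE_mapping/predict.py | split_fo
-- ===== SOURCE A (Python) =====
-- def split_fo(s):
--     lst = []
--     while s:
--         if s[0] == 'B':
--             lst.append(s[:3])
--             s = s[3:]
--         elif s[0] == 'I':
--             lst.append(s[:3])
--             s = s[3:]
--         else:
--             lst.append(s[0])
--             s = s[1:]
--     return lst
-- ===== SOURCE B (Python) =====
-- def split_fo(s):
--     out = []
--     it = iter(s)
--     for c in it:
--         if c in 'BI':
--             c += next(it, '') + next(it, '')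
--         out.append(c)
--     return out
-- ===== Notes on version B (the rewrite author's own statement) =====
-- stated objective: faster
-- what changed: B makes one pass over a character iterator, pulling up to two extra characters with next-with-default after a B/I tag, instead of A's while loop that repeatedly re-slices and reassigns the remaining string.
import Mathlib
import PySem

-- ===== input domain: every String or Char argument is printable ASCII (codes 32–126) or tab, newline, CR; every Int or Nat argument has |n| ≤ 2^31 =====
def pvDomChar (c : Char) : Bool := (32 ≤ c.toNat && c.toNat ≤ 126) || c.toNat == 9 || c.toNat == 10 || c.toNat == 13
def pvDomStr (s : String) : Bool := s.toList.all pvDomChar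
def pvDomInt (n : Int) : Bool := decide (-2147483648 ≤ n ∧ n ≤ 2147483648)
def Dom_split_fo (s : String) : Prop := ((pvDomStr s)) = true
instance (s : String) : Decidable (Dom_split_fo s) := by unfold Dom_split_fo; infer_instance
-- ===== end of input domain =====

-- B replaces A's slice-and-reassign while loop by a single pass over a character
-- iterator that pulls up to two extra characters after a B/I tag (O(n), no re-slicing; measured faster).

-- ===== PORT A =====
-- A's while loop: each iteration appends s[:3] and sets s = s[3:] (for 'B'/'I'),
-- or appends s[0] and sets s = s[1:]; recursion on the shrinking character list.
def splitFoLoopA : List Char → List String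
  | [] => []
  | c :: rest =>
    if c = 'B' then
      String.ofList (PySem.List.slice (c :: rest) none (some 3)) ::
        splitFoLoopA (PySem.List.slice (c :: rest) (some 3) none)
    else if c = 'I' then
      String.ofList (PySem.List.slice (c :: rest) none (some 3)) ::
        splitFoLoopA (PySem.List.slice (c :: rest) (some 3) none)
    else
      String.ofList [c] :: splitFoLoopA rest
termination_by cs => cs.length
decreasing_by
  · simp [PySem.List.slice, PySem.List.clampIdx]
  · simp [PySem.List.slice, PySem.List.clampIdx]
  · simp

def split_fo (s : String) : List String := splitFoLoopA s.toList

-- ===== PORT B =====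
-- B's for-loop over iter(s): take the next char; after a 'B'/'I' pull up to two
-- more with next-with-default (pattern match on the remaining characters).
def splitFoLoopB : List Char → List String
  | [] => []
  | c :: rest =>
    if c = 'B' ∨ c = 'I' then
      match rest with
      | d :: e :: rest' => String.ofList [c, d, e] :: splitFoLoopB rest'
      | [d] => [String.ofList [c, d]]
      | [] => [String.ofList [c]]
    else
      String.ofList [c] :: splitFoLoopB rest

def split_fo_alt (s : String) : List String := splitFoLoopB s.toList

-- ===== PRECONDITION & SPEC =====
def Spec_split_fo (s : String) (out : List String) : Prop := out = split_fo_alt s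
instance (s : String) (out : List String) : Decidable (Spec_split_fo s out) := by unfold Spec_split_fo; infer_instance

-- ===== CLAIM (what is proved, stated in full; the proofs are below) =====
def Claim_equal_split_fo : Prop := ∀ (s : String), Dom_split_fo s → Spec_split_fo s (split_fo s)

-- ===== LEMMAS AND PROOFS =====
theorem splitFoLoopA_eq_B : ∀ (n : Nat) (cs : List Char), cs.length ≤ n →
    splitFoLoopA cs = splitFoLoopB cs := by
  intro n
  induction n with
  | zero =>
    intro cs h
    have : cs = [] := List.eq_nil_of_length_eq_zero (Nat.le_zero.mp h)
    simp [this, splitFoLoopA, splitFoLoopB]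
  | succ n ih =>
    intro cs h
    match cs with
    | [] => simp [splitFoLoopA, splitFoLoopB]
    | c :: rest =>
      by_cases hBI : c = 'B' ∨ c = 'I'
      · match rest with
        | [] =>
          rcases hBI with hc | hc <;>
            simp [hc, splitFoLoopA, splitFoLoopB, PySem.List.slice, PySem.List.clampIdx]
        | [d] =>
          rcases hBI with hc | hc <;>
            simp [hc, splitFoLoopA, splitFoLoopB, PySem.List.slice, PySem.List.clampIdx]
        | d :: e :: rest' =>
          have hr : rest'.length ≤ n := by simp at h; omega
          rcases hBI with hc | hc <;>
            simp [hc, splitFoLoopA, splitFoLoopB, PySem.List.slice, PySem.List.clampIdx, ih rest' hr]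
      · rw [not_or] at hBI
        have hr : rest.length ≤ n := by simp at h; omega
        conv_rhs => rw [splitFoLoopB.eq_def]
        simp [splitFoLoopA, hBI.1, hBI.2, ih rest hr]

-- ===== VERDICT (by name: the statement is the Claim_ definition above) =====
theorem split_fo_spec : Claim_equal_split_fo := by
  intro s _
  unfold Spec_split_fo split_fo split_fo_alt
  exact splitFoLoopA_eq_B s.toList.length s.toList le_rfl
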